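-- pv_equiv track=rewrite | github.com/abrahamgustafson/DrinkingGames | content_creator.py | get_longest_dryspell
-- ===== SOURCE A (Python) =====
-- def get_longest_dryspell(list_of_events_seconds, movie_end_seconds):
--     list_of_events_seconds.append(movie_end_seconds)
--     list_of_events_seconds.sort()
--     biggest_diff = 0
--     for i, x in enumerate(list_of_events_seconds):
--         previous_val = 0
--         if i > 0:
--             previous_val = list_of_events_seconds[i - 1]
--
--         if x - previous_val > biggest_diff:
--             biggest_diff = x - previous_val
--     return biggest_diff
-- ===== SOURCE B (Python) =====
-- def get_longest_dryspell(list_of_events_seconds, movie_end_seconds):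
--     # Selection-based: no sorting; repeatedly extract the minimum of the
--     # remaining multiset, tracking the previous extracted value (seeded with 0)
--     # and the largest gap seen so far.  (Pure: does not mutate the argument.)
--     remaining = list_of_events_seconds + [movie_end_seconds]
--     prev = 0
--     best = 0
--     while remaining:
--         m = min(remaining)
--         remaining.remove(m)
--         if m - prev > best:
--             best = m - prev
--         prev = m
--     return best
-- ===== Notes on version B (the rewrite author's own statement) =====
-- stated objective: alternative
-- what changed: replaces sort-then-scan-consecutive-pairs by a selection algorithm with no sort call: the minimum is repeatedly extracted from a shrinking multiset while a previous-value/best-gap accumulator pair is maintained; it trades A's O(n log n) sort for quadratic repeated min-extraction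
import Mathlib
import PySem

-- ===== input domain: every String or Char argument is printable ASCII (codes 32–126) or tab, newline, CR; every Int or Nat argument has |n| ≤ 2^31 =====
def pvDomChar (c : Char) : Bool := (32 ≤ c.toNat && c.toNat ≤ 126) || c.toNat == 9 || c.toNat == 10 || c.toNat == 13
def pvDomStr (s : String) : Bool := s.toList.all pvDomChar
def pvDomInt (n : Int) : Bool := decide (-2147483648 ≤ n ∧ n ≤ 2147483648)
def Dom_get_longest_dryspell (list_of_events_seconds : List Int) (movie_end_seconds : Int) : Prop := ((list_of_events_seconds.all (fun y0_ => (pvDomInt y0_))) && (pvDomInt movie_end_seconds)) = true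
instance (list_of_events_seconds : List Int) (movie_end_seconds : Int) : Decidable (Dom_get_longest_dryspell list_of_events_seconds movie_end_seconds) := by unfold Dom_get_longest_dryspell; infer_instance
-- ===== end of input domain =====

-- B replaces A's sort-then-scan by a selection algorithm (repeated minimum extraction from a
-- shrinking multiset, no sort call); return values only — A mutates its argument in place
-- (append + sort), B does not mutate it.

-- ===== PORT A =====
def get_longest_dryspell (list_of_events_seconds : List Int) (movie_end_seconds : Int) : Int :=
  let lst := PySem.List.sorted (list_of_events_seconds ++ [movie_end_seconds]) (fun x => x) false
  (PySem.List.enumerate lst 0).foldl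
    (fun biggest_diff p =>
      -- previous_val = lst[i-1] when i > 0 (always in range there), else 0
      let previous_val : Int := if p.1 > 0 then PySem.List.pyGetD lst (p.1 - 1) 0 else 0
      if p.2 - previous_val > biggest_diff then p.2 - previous_val else biggest_diff)
    0

-- ===== PORT B =====
-- the while loop: while remaining: m = min(remaining); remaining.remove(m); update best/prev
-- (remaining.remove(m) never raises: m = min(remaining) is a member; the getD [] is dead)
def pvAltLoop (remaining : List Int) (prev best : Int) : Int :=
  match h : PySem.List.min? remaining (fun x => x) with
  | none => best            -- remaining is empty: loop ends, return best
  | some m =>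
      pvAltLoop ((PySem.List.remove? remaining m).getD [])
        m (if m - prev > best then m - prev else best)
termination_by remaining.length
decreasing_by
  have hm : m ∈ remaining := PySem.List.min?_mem h
  rw [PySem.List.remove?_eq_some_erase remaining m hm]
  have h1 : (remaining.erase m).length = remaining.length - 1 := List.length_erase_of_mem hm
  have h2 : 0 < remaining.length := List.length_pos_of_mem hm
  simp [h1]; omega

def get_longest_dryspell_alt (list_of_events_seconds : List Int) (movie_end_seconds : Int) : Int :=
  pvAltLoop (list_of_events_seconds ++ [movie_end_seconds]) 0 0

-- ===== PRECONDITION & SPEC =====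
def Spec_get_longest_dryspell (list_of_events_seconds : List Int) (movie_end_seconds : Int) (out : Int) : Prop := out = get_longest_dryspell_alt list_of_events_seconds movie_end_seconds
instance (list_of_events_seconds : List Int) (movie_end_seconds : Int) (out : Int) : Decidable (Spec_get_longest_dryspell list_of_events_seconds movie_end_seconds out) := by unfold Spec_get_longest_dryspell; infer_instance

-- ===== CLAIM (what is proved, stated in full; the proofs are below) =====
def Claim_equal_get_longest_dryspell : Prop := ∀ (list_of_events_seconds : List Int) (movie_end_seconds : Int), Dom_get_longest_dryspell list_of_events_seconds movie_end_seconds → Spec_get_longest_dryspell list_of_events_seconds movie_end_seconds (get_longest_dryspell list_of_events_seconds movie_end_seconds)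

-- ===== LEMMAS AND PROOFS =====

-- the common reference computation: one pass over a list with (prev, best) state
def pvStep (s : Int × Int) (x : Int) : Int × Int :=
  (x, if x - s.1 > s.2 then x - s.1 else s.2)

-- The pair list A reads element by element is ((0::lst)[i], lst[i]) = (previous_val, x);
-- holds for ANY list.
lemma zip_shift_eq_map_enumerate (lst : List Int) :
    List.zip (0 :: lst) lst =
      (PySem.List.enumerate lst 0).map
        (fun p => ((if p.1 > 0 then PySem.List.pyGetD lst (p.1 - 1) 0 else 0), p.2)) := by
  apply List.ext_getElem
  · simp [PySem.List.length_enumerate]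
  · intro k h1 h2
    have hk : k < lst.length := by
      simpa [PySem.List.length_enumerate] using h2
    simp only [List.getElem_zip, List.getElem_map, PySem.List.getElem_enumerate]
    rcases Nat.eq_zero_or_pos k with hk0 | hkpos
    · subst hk0; simp
    · have h0 : (0 : Int) < (0 : Int) + (k : Int) := by omega
      have hcast : ((0 : Int) + (k : Int)) - 1 = ((k - 1 : Nat) : Int) := by omega
      have hlt : k - 1 < lst.length := by omega
      simp only [if_pos h0, hcast, PySem.List.pyGetD_natCast]
      have hz : (0 :: lst)[k]'(by simp; omega) = lst[k - 1] := by
        rcases k with _ | k'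
        · omega
        · simp
      rw [hz, List.getD_eq_getElem _ _ hlt]

-- folding the gap-update over the shifted zip is the (prev, best) state pass
lemma foldl_zip_shift (t : List Int) : ∀ (prev b : Int),
    (List.zip (prev :: t) t).foldl (fun acc p => if p.2 - p.1 > acc then p.2 - p.1 else acc) b
      = (t.foldl pvStep (prev, b)).2 := by
  induction t with
  | nil => intro prev b; simp
  | cons x t' ih =>
      intro prev b
      simpa [pvStep] using ih x (if x - prev > b then x - prev else b)

-- the sorted list of a nonempty multiset is its minimum consed on the sorted rest
lemma sorted_cons_min (l : List Int) (m : Int)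
    (h : PySem.List.min? l (fun x => x) = some m) :
    PySem.List.sorted l (fun x => x) false
      = m :: PySem.List.sorted (l.erase m) (fun x => x) false := by
  have hm : m ∈ l := PySem.List.min?_mem h
  have hmin : ∀ y ∈ l, m ≤ y := fun y hy => PySem.List.min?_isMin h y hy
  apply PySem.List.sorted_id_eq_of_perm_of_pairwise
  · exact ((PySem.List.sorted_perm _ _ _).cons m).trans (List.perm_cons_erase hm).symm
  · rw [List.pairwise_cons]
    refine ⟨fun y hy => ?_, ?_⟩
    · exact hmin y (List.mem_of_mem_erase ((PySem.List.mem_sorted _ _ _ _).1 hy))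
    · exact PySem.List.sorted_pairwise _ _

-- B's selection loop computes the (prev, best) state pass over the sorted multiset
lemma pvAltLoop_eq (n : Nat) : ∀ (l : List Int), l.length ≤ n → ∀ (prev b : Int),
    pvAltLoop l prev b = ((PySem.List.sorted l (fun x => x) false).foldl pvStep (prev, b)).2 := by
  induction n with
  | zero =>
      intro l hl prev b
      have hnil : l = [] := List.eq_nil_of_length_eq_zero (by omega)
      subst hnil
      rw [pvAltLoop.eq_def]
      simp [PySem.List.min?, PySem.List.sorted]
  | succ n ih =>
      intro l hl prev b
      rw [pvAltLoop.eq_def]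
      split
      case _ h =>
          have hnil : l = [] := (PySem.List.min?_eq_none_iff l _).1 h
          subst hnil
          simp [PySem.List.sorted]
      case _ m h =>
          have hm : m ∈ l := PySem.List.min?_mem h
          have hlen : (l.erase m).length = l.length - 1 := List.length_erase_of_mem hm
          have hpos : 0 < l.length := List.length_pos_of_mem hm
          rw [PySem.List.remove?_eq_some_erase l m hm, Option.getD_some,
              ih (l.erase m) (by omega),
              sorted_cons_min l m h]
          simp [pvStep]

-- ===== VERDICT (by name: the statement is the Claim_ definition above) =====
theorem get_longest_dryspell_spec : Claim_equal_get_longest_dryspell := by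
  intro xs m _
  unfold Spec_get_longest_dryspell get_longest_dryspell get_longest_dryspell_alt
  rw [pvAltLoop_eq (xs ++ [m]).length _ le_rfl]
  rw [← foldl_zip_shift, zip_shift_eq_map_enumerate, List.foldl_map]
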